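-- pv_equiv track=rewrite | github.com/HereIsZephyrus/global_lake_adft | packages/lakeanalysis/src/lakeanalysis/quality/frozen.py | frozen_run_indices
-- ===== SOURCE A (Python) =====
-- def year_month_key_to_index(year_month_key: int) -> int:
--     """Convert a YYYYMM key to a continuous month index."""
--     year = year_month_key // 100
--     month = year_month_key % 100
--     return year * 12 + (month - 1)
--
-- def frozen_run_indices(frozen_year_months: set[int] | None) -> list[tuple[int, int]]:
--     """Return contiguous frozen-month runs as inclusive month-index intervals."""
--     if not frozen_year_months:
--         return []
--     month_indices = sorted(year_month_key_to_index(key) for key in frozen_year_months)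
--     runs: list[tuple[int, int]] = []
--     run_start = month_indices[0]
--     previous = month_indices[0]
--     for month_index in month_indices[1:]:
--         if month_index == previous + 1:
--             previous = month_index
--             continue
--         runs.append((run_start, previous))
--         run_start = month_index
--         previous = month_index
--     runs.append((run_start, previous))
--     return runs
-- ===== SOURCE B (Python) =====
-- def year_month_key_to_index(year_month_key: int) -> int:
--     """Convert a YYYYMM key to a continuous month index."""
--     year = year_month_key // 100
--     month = year_month_key % 100
--     return year * 12 + (month - 1)
--
-- def frozen_run_indices(frozen_year_months):
--     """Return contiguous frozen-month runs as inclusive month-index intervals."""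
--     if not frozen_year_months:
--         return []
--     idx = sorted(year_month_key_to_index(key) for key in frozen_year_months)
--     breaks = [0] + [i for i in range(1, len(idx)) if idx[i] != idx[i - 1] + 1] + [len(idx)]
--     return [(idx[a], idx[b - 1]) for a, b in zip(breaks, breaks[1:])]
-- ===== Notes on version B (the rewrite author's own statement) =====
-- stated objective: alternative
-- what changed: Replaces A's single stateful pass (tracking run_start/previous and flushing the open run) with two staged passes over the sorted indices: first compute the list of break positions i where idx[i] != idx[i-1]+1, then read each inclusive interval off between consecutive break positions with zip.
import Mathlib
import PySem

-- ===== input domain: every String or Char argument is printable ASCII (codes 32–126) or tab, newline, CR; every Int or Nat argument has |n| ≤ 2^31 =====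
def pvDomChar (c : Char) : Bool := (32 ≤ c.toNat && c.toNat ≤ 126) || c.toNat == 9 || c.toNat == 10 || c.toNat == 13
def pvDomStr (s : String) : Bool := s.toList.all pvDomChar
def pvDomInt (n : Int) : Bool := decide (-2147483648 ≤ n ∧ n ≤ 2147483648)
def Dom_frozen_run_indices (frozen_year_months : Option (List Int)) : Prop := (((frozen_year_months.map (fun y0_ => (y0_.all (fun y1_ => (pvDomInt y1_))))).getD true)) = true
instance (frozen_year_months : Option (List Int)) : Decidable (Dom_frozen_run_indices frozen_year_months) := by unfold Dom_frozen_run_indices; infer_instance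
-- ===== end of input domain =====

-- B replaces A's run-tracking fold by two staged passes: first compute the break
-- POSITIONS (indices i where sorted[i] ≠ sorted[i-1]+1), then read each interval off
-- between consecutive breaks with zip (objective: alternative decomposition, same cost).

-- ===== PORT A =====
def year_month_key_to_index (year_month_key : Int) : Int :=
  let year := PySem.Int.floordiv year_month_key 100
  let month := PySem.Int.mod year_month_key 100
  year * 12 + (month - 1)

def frozen_run_indices (frozen_year_months : Option (List Int)) : List (Int × Int) :=
  match frozen_year_months with
  | none => []
  | some xs =>
    if xs = [] then []
    else
      let month_indices := PySem.List.sorted (xs.map year_month_key_to_index) (fun x => x) false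
      match month_indices with
      | [] => []
      | h :: t =>
        let st := t.foldl
          (fun (st : List (Int × Int) × Int × Int) month_index =>
            let (runs, run_start, previous) := st
            if month_index = previous + 1 then (runs, run_start, month_index)
            else (runs ++ [(run_start, previous)], month_index, month_index))
          ([], h, h)
        st.1 ++ [(st.2.1, st.2.2)]

-- ===== PORT B =====
-- Source B's break test 'idx[i] != idx[i - 1] + 1'; every access is in range, so the
-- pyGetD default 0 is never consulted
def b_break (idx : List Int) (i : Int) : Bool :=
  PySem.List.pyGetD idx i 0 != PySem.List.pyGetD idx (i - 1) 0 + 1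

-- Source B's 'breaks = [0] + [i for i in range(1, len(idx)) if idx[i] != idx[i-1] + 1] + [len(idx)]'
def b_breaks (idx : List Int) : List Int :=
  [0] ++ (PySem.List.pyRange 1 (idx.length : Int) 1).filter (b_break idx) ++ [(idx.length : Int)]

def frozen_run_indices_alt (frozen_year_months : Option (List Int)) : List (Int × Int) :=
  match frozen_year_months with
  | none => []
  | some xs =>
    if xs = [] then []
    else
      let idx := PySem.List.sorted (xs.map year_month_key_to_index) (fun x => x) false
      let breaks := b_breaks idx
      (breaks.zip breaks.tail).map
        (fun ab => (PySem.List.pyGetD idx ab.1 0, PySem.List.pyGetD idx (ab.2 - 1) 0))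

-- ===== PRECONDITION & SPEC =====
def Spec_frozen_run_indices (frozen_year_months : Option (List Int)) (out : List (Int × Int)) : Prop := out = frozen_run_indices_alt frozen_year_months
instance (frozen_year_months : Option (List Int)) (out : List (Int × Int)) : Decidable (Spec_frozen_run_indices frozen_year_months out) := by unfold Spec_frozen_run_indices; infer_instance

-- ===== CLAIM (what is proved, stated in full; the proofs are below) =====
def Claim_equal_frozen_run_indices : Prop := ∀ (frozen_year_months : Option (List Int)), Dom_frozen_run_indices frozen_year_months → Spec_frozen_run_indices frozen_year_months (frozen_run_indices frozen_year_months)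

-- ===== LEMMAS AND PROOFS =====

-- functional form of A's fold over the remaining months, given the open run (s, p)
def gRuns (s p : Int) : List Int → List (Int × Int)
  | [] => [(s, p)]
  | m :: t => if m = p + 1 then gRuns s m t else (s, p) :: gRuns m m t

theorem foldA_eq_gRuns (t : List Int) (acc : List (Int × Int)) (s p : Int) :
    (let st := t.foldl
        (fun (st : List (Int × Int) × Int × Int) month_index =>
          let (runs, run_start, previous) := st
          if month_index = previous + 1 then (runs, run_start, month_index)
          else (runs ++ [(run_start, previous)], month_index, month_index))
        (acc, s, p)
     st.1 ++ [(st.2.1, st.2.2)]) = acc ++ gRuns s p t := by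
  induction t generalizing acc s p with
  | nil => simp [gRuns]
  | cons m t ih =>
    simp only [List.foldl_cons, gRuns]
    by_cases h : m = p + 1
    · simp [h, ih]
    · simp [h, ih, List.append_assoc]

-- gRuns ignores the recorded run start except in the head interval
theorem gRuns_start (t : List Int) (p s : Int) :
    gRuns s p t = (s, (gRuns p p t).headI.2) :: (gRuns p p t).tail := by
  induction t generalizing p s with
  | nil => simp [gRuns]
  | cons m r ih =>
    by_cases h : m = p + 1
    · simp only [gRuns, if_pos h]
      rw [ih m s, ih m p]
      simp
    · simp [gRuns, if_neg h]

-- B's output as a function of the sorted index list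
def outB (idx : List Int) : List (Int × Int) :=
  ((b_breaks idx).zip (b_breaks idx).tail).map
    (fun ab => (PySem.List.pyGetD idx ab.1 0, PySem.List.pyGetD idx (ab.2 - 1) 0))

theorem pyGetD_cons_succ (x : Int) (xs : List Int) (i d : Int) (h : 0 ≤ i) :
    PySem.List.pyGetD (x :: xs) (i + 1) d = PySem.List.pyGetD xs i d := by
  rw [PySem.List.pyGetD_of_nonneg _ _ (by omega), PySem.List.pyGetD_of_nonneg _ _ h]
  have hnat : (i + 1).toNat = i.toNat + 1 := by omega
  simp [hnat]

theorem pyRange_shift (a b : Int) :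
    PySem.List.pyRange (a + 1) (b + 1) 1 = (PySem.List.pyRange a b 1).map (· + 1) := by
  rw [PySem.List.pyRange_one, PySem.List.pyRange_one]
  have hsub : b + 1 - (a + 1) = b - a := by ring
  rw [hsub, List.map_map]
  apply List.map_congr_left
  intro k _
  simp [Function.comp]
  ring

theorem b_breaks_tail_pos (c : Int) (l : List Int) :
    ∀ x ∈ (b_breaks (c :: l)).tail, 1 ≤ x := by
  intro x hx
  have hx' : x ∈ (PySem.List.pyRange 1 (((c :: l).length : Int)) 1).filter (b_break (c :: l))
      ++ [(((c :: l).length : Int))] := hx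
  rcases List.mem_append.mp hx' with hf | hs
  · exact (PySem.List.mem_pyRange_one.mp (List.mem_filter.mp hf).1).1
  · have hxe : x = (((c :: l).length : Int)) := by simpa using hs
    subst hxe
    have h1 : (1 : Nat) ≤ (c :: l).length := by simp
    exact_mod_cast h1

theorem b_breaks_nonneg (c : Int) (l : List Int) :
    ∀ x ∈ b_breaks (c :: l), 0 ≤ x := by
  intro x hx
  have hx' : x ∈ (0 : Int) :: ((PySem.List.pyRange 1 (((c :: l).length : Int)) 1).filter
      (b_break (c :: l)) ++ [(((c :: l).length : Int))]) := hx
  rcases List.mem_cons.mp hx' with hxe | h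
  · omega
  · have := b_breaks_tail_pos c l x h
    omega

def pairsOf (l : List Int) : List (Int × Int) := l.zip l.tail

theorem pairsOf_map_add_one (l : List Int) :
    pairsOf (l.map (· + 1)) = (pairsOf l).map (fun ab => (ab.1 + 1, ab.2 + 1)) := by
  simp only [pairsOf, ← List.map_tail, List.zip_map]
  apply List.map_congr_left
  intro ab _
  rfl

theorem mem_pairsOf : ∀ (l : List Int) (a b : Int), (a, b) ∈ pairsOf l → a ∈ l ∧ b ∈ l.tail
  | [], a, b, h => by simp [pairsOf] at h
  | [x], a, b, h => by simp [pairsOf] at h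
  | x :: y :: l, a, b, h => by
    have hstep : pairsOf (x :: y :: l) = (x, y) :: pairsOf (y :: l) := rfl
    rw [hstep, List.mem_cons] at h
    rcases h with h | h
    · obtain ⟨rfl, rfl⟩ := Prod.mk.injEq .. ▸ (by simpa using h : a = x ∧ b = y)
      exact ⟨List.mem_cons_self, List.mem_cons_self⟩
    · obtain ⟨h1, h2⟩ := mem_pairsOf (y :: l) a b h
      exact ⟨List.mem_cons_of_mem _ h1, List.mem_cons_of_mem _ h2⟩

-- the staged recursion of b_breaks along the sorted list
theorem b_breaks_cons (h m : Int) (r : List Int) :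
    b_breaks (h :: m :: r) =
      if m = h + 1 then 0 :: ((b_breaks (m :: r)).tail.map (· + 1))
      else 0 :: ((b_breaks (m :: r)).map (· + 1)) := by
  have hlen : ((h :: m :: r).length : Int) = ((m :: r).length : Int) + 1 := by
    push_cast [List.length_cons]; ring
  have hpos : (1 : Int) < ((m :: r).length : Int) + 1 := by
    have : 1 ≤ (m :: r).length := by simp
    omega
  have hrange : PySem.List.pyRange 1 ((h :: m :: r).length : Int) 1 =
      1 :: (PySem.List.pyRange 1 ((m :: r).length : Int) 1).map (· + 1) := by
    rw [hlen, PySem.List.pyRange_one_cons hpos]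
    congr 1
    exact pyRange_shift 1 _
  have hb1 : b_break (h :: m :: r) 1 = decide ¬(m = h + 1) := by
    have e1 : PySem.List.pyGetD (h :: m :: r) 1 0 = m := by
      rw [PySem.List.pyGetD_ofNat']; rfl
    have e0 : PySem.List.pyGetD (h :: m :: r) (1 - 1) 0 = h := by
      norm_num [PySem.List.pyGetD_ofNat']
    simp [b_break, e1]
    by_cases hx : m = h + 1 <;> simp [hx]
  have hfilter : (PySem.List.pyRange 1 ((m :: r).length : Int) 1).filter
        (fun i => b_break (h :: m :: r) (i + 1)) =
      (PySem.List.pyRange 1 ((m :: r).length : Int) 1).filter (b_break (m :: r)) := by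
    apply List.filter_congr
    intro i hi
    have h1i : 1 ≤ i := (PySem.List.mem_pyRange_one.mp hi).1
    have eA : PySem.List.pyGetD (h :: m :: r) (i + 1) 0 = PySem.List.pyGetD (m :: r) i 0 :=
      pyGetD_cons_succ _ _ _ _ (by omega)
    have eB : PySem.List.pyGetD (h :: m :: r) i 0 =
        PySem.List.pyGetD (m :: r) (i - 1) 0 := by
      conv_lhs => rw [show i = (i - 1) + 1 from by ring]
      rw [pyGetD_cons_succ _ _ _ _ (by omega)]
    simp [b_break, eA, eB]
  unfold b_breaks
  rw [hrange, List.filter_cons, hb1, List.filter_map]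
  have hcomp : (b_break (h :: m :: r)) ∘ (· + 1) = fun i => b_break (h :: m :: r) (i + 1) := rfl
  rw [hcomp, hfilter]
  by_cases hm : m = h + 1
  · simp only [hm, decide_not]
    rw [if_neg (by simp)]
    simp [List.map_append]
  · rw [if_pos (by simp [hm]), if_neg hm]
    simp [List.map_append]

-- B's staged construction on the sorted list h :: t equals A's run recursion gRuns
theorem main_outB (t : List Int) (h : Int) : outB (h :: t) = gRuns h h t := by
  induction t generalizing h with
  | nil =>
    have : b_breaks [h] = [0, 1] := by
      simp [b_breaks]
    simp only [outB, this, gRuns]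
    norm_num [PySem.List.pyGetD_ofNat']
  | cons m r ih =>
    have hbs : ∃ s, b_breaks (m :: r) = 0 :: s ∧ s ≠ [] := by
      refine ⟨(PySem.List.pyRange 1 (((m :: r).length : Int)) 1).filter (b_break (m :: r))
        ++ [(((m :: r).length : Int))], by simp [b_breaks], by simp⟩
    obtain ⟨s, hbs, hsne⟩ := hbs
    obtain ⟨c, s', rfl⟩ : ∃ c s', s = c :: s' := by
      cases s with
      | nil => exact absurd rfl hsne
      | cons c s' => exact ⟨c, s', rfl⟩
    have hspos : ∀ x ∈ c :: s', 1 ≤ x := by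
      intro x hx
      have := b_breaks_tail_pos m r x (by rw [hbs]; simpa using hx)
      exact this
    have hc1 : 1 ≤ c := hspos c (by simp)
    -- shifted tail entries read through (h :: m :: r) equal the same entries read
    -- through (m :: r)
    have hshift : ∀ (P : List (Int × Int)),
        (∀ ab ∈ P, 0 ≤ ab.1 ∧ 1 ≤ ab.2) →
        (P.map (fun ab => (ab.1 + 1, ab.2 + 1))).map
            (fun ab => (PySem.List.pyGetD (h :: m :: r) ab.1 0,
                        PySem.List.pyGetD (h :: m :: r) (ab.2 - 1) 0)) =
          P.map (fun ab => (PySem.List.pyGetD (m :: r) ab.1 0,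
                            PySem.List.pyGetD (m :: r) (ab.2 - 1) 0)) := by
      intro P hP
      rw [List.map_map]
      apply List.map_congr_left
      intro ab hab
      obtain ⟨ha, hb⟩ := hP ab hab
      have e1 : PySem.List.pyGetD (h :: m :: r) (ab.1 + 1) 0 =
          PySem.List.pyGetD (m :: r) ab.1 0 := pyGetD_cons_succ _ _ _ _ ha
      have e2 : PySem.List.pyGetD (h :: m :: r) ab.2 0 =
          PySem.List.pyGetD (m :: r) (ab.2 - 1) 0 := by
        conv_lhs => rw [show ab.2 = (ab.2 - 1) + 1 from by ring]
        rw [pyGetD_cons_succ _ _ _ _ (by omega)]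
      simp [Function.comp, e1, e2]
    have hmemP : ∀ ab ∈ pairsOf (0 :: c :: s'), 0 ≤ ab.1 ∧ 1 ≤ ab.2 := by
      intro ab hab
      obtain ⟨h1, h2⟩ := mem_pairsOf _ ab.1 ab.2 (by simpa using hab)
      constructor
      · have := b_breaks_nonneg m r ab.1 (by rw [hbs]; exact h1)
        exact this
      · exact hspos ab.2 (by simpa using h2)
    have hmemS : ∀ ab ∈ pairsOf (c :: s'), 0 ≤ ab.1 ∧ 1 ≤ ab.2 := by
      intro ab hab
      obtain ⟨h1, h2⟩ := mem_pairsOf _ ab.1 ab.2 (by simpa using hab)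
      exact ⟨by have := hspos ab.1 h1; omega,
        hspos ab.2 (List.mem_of_mem_tail h2)⟩
    by_cases hm : m = h + 1
    · -- merge: the head run of (m :: r) is extended backward to start at h
      have hbrk : b_breaks (h :: m :: r) = 0 :: ((c :: s').map (· + 1)) := by
        rw [b_breaks_cons, if_pos hm, hbs]
        rfl
      have hpair : pairsOf (b_breaks (h :: m :: r)) =
          (0, c + 1) :: (pairsOf (c :: s')).map (fun ab => (ab.1 + 1, ab.2 + 1)) := by
        rw [hbrk, ← pairsOf_map_add_one]
        cases s' <;> rfl
      have houtB : outB (h :: m :: r) =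
          (h, PySem.List.pyGetD (m :: r) (c - 1) 0) ::
            (pairsOf (c :: s')).map (fun ab => (PySem.List.pyGetD (m :: r) ab.1 0,
              PySem.List.pyGetD (m :: r) (ab.2 - 1) 0)) := by
        show (pairsOf (b_breaks (h :: m :: r))).map _ = _
        rw [hpair, List.map_cons, hshift _ hmemS]
        congr 1
        have e0 : PySem.List.pyGetD (h :: m :: r) 0 0 = h := by
          rw [PySem.List.pyGetD_ofNat']; rfl
        have ec : PySem.List.pyGetD (h :: m :: r) c 0 =
            PySem.List.pyGetD (m :: r) (c - 1) 0 := by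
          conv_lhs => rw [show c = (c - 1) + 1 from by ring]
          rw [pyGetD_cons_succ _ _ _ _ (by omega)]
        simp [e0, ec]
      have houtTl : outB (m :: r) =
          (m, PySem.List.pyGetD (m :: r) (c - 1) 0) ::
            (pairsOf (c :: s')).map (fun ab => (PySem.List.pyGetD (m :: r) ab.1 0,
              PySem.List.pyGetD (m :: r) (ab.2 - 1) 0)) := by
        show (pairsOf (b_breaks (m :: r))).map _ = _
        rw [hbs]
        have : pairsOf (0 :: c :: s') = (0, c) :: pairsOf (c :: s') := rfl
        rw [this, List.map_cons]
        congr 1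
        have e0 : PySem.List.pyGetD (m :: r) 0 0 = m := by
          rw [PySem.List.pyGetD_ofNat']; rfl
        simp [e0]
      have hg : gRuns m m r =
          (m, PySem.List.pyGetD (m :: r) (c - 1) 0) ::
            (pairsOf (c :: s')).map (fun ab => (PySem.List.pyGetD (m :: r) ab.1 0,
              PySem.List.pyGetD (m :: r) (ab.2 - 1) 0)) := by
        rw [← ih m, houtTl]
      show outB (h :: m :: r) = gRuns h h (m :: r)
      rw [houtB]
      have : gRuns h h (m :: r) = gRuns h m r := by simp [gRuns, hm]
      rw [this, gRuns_start r m h, hg]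
      simp
    · -- break: a fresh singleton run (h, h) precedes the runs of (m :: r)
      have hbrk : b_breaks (h :: m :: r) = 0 :: ((0 :: c :: s').map (· + 1)) := by
        rw [b_breaks_cons, if_neg hm, hbs]
      have hpair : pairsOf (b_breaks (h :: m :: r)) =
          (0, 1) :: (pairsOf (0 :: c :: s')).map (fun ab => (ab.1 + 1, ab.2 + 1)) := by
        rw [hbrk, ← pairsOf_map_add_one]
        rfl
      have houtB : outB (h :: m :: r) = (h, h) ::
          (pairsOf (0 :: c :: s')).map (fun ab => (PySem.List.pyGetD (m :: r) ab.1 0,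
            PySem.List.pyGetD (m :: r) (ab.2 - 1) 0)) := by
        show (pairsOf (b_breaks (h :: m :: r))).map _ = _
        rw [hpair, List.map_cons, hshift _ hmemP]
        congr 1
        have e0 : PySem.List.pyGetD (h :: m :: r) 0 0 = h := by
          rw [PySem.List.pyGetD_ofNat']; rfl
        have e1 : PySem.List.pyGetD (h :: m :: r) (1 - 1) 0 = h := by
          norm_num [PySem.List.pyGetD_ofNat']
        simp [e0]
      have houtTl : outB (m :: r) =
          (pairsOf (0 :: c :: s')).map (fun ab => (PySem.List.pyGetD (m :: r) ab.1 0,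
            PySem.List.pyGetD (m :: r) (ab.2 - 1) 0)) := by
        show (pairsOf (b_breaks (m :: r))).map _ = _
        rw [hbs]
      show outB (h :: m :: r) = gRuns h h (m :: r)
      rw [houtB, ← houtTl, ih m]
      simp [gRuns, hm]

-- ===== VERDICT (by name: the statement is the Claim_ definition above) =====
theorem frozen_run_indices_spec : Claim_equal_frozen_run_indices := by
  intro fym _
  unfold Spec_frozen_run_indices frozen_run_indices frozen_run_indices_alt
  cases fym with
  | none => rfl
  | some xs =>
    simp only
    split
    · rfl
    · cases h : PySem.List.sorted (xs.map year_month_key_to_index) (fun x => x) false with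
      | nil =>
        exfalso
        have hl := PySem.List.length_sorted (xs.map year_month_key_to_index) (fun x : Int => x) false
        rw [h] at hl
        simp at hl
        next hne => exact hne (List.eq_nil_of_length_eq_zero hl.symm)
      | cons hd tl =>
        have h1 := foldA_eq_gRuns tl [] hd hd
        rw [List.nil_append] at h1
        exact h1.trans (main_outB tl hd).symm
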